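-- pv_equiv track=rewrite | github.com/abdelrahman-m123/Sorting_Algorithms_Analyzer | Sorting_Algorithm_Analyzer.py | quick_sort_steps
-- ===== SOURCE A (Python) =====
-- class StepCounter:
--     comparisons = 0
--     swaps = 0
--     def _init_(self):
--         self.comparisons = 0
--         self.swaps = 0
--
--     def add_comparison(self):
--         self.comparisons += 1
--
--     def add_swap(self):
--         self.swaps += 1
--
--     def total_steps(self):
--         return self.comparisons + self.swaps
--
-- def quick_sort_steps(arr):
--     counter = StepCounter()
--
--     def partition(A, p, r):
--         x = A[r]  # Pivot element
--         i = p - 1  # Index of smaller element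
--
--         for j in range(p, r):
--             counter.add_comparison()
--             if A[j] <= x:
--                 i += 1
--                 # Swap A[i] and A[j]
--                 A[i], A[j] = A[j], A[i]
--                 counter.add_swap()
--
--         # Swap A[i + 1] and A[r] (the pivot element)
--         A[i + 1], A[r] = A[r], A[i + 1]
--         counter.add_swap()
--         return i + 1
--
--     def quick_sort(A, p, r):
--         counter.add_comparison()
--         if p < r:
--
--             # Partition the array and get the pivot index
--             q = partition(A, p, r)
--
--             # Recursively sort elements before and after partition
--             quick_sort(A, p, q - 1)
--             quick_sort(A, q + 1, r)
--
--
--     quick_sort(arr.copy(), 0 ,len(arr)-1)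
--     return counter.total_steps()
-- ===== SOURCE B (Python) =====
-- def quick_sort_steps(arr):
--     a = arr.copy()
--     comps = 0
--     swaps = 0
--     stack = [(0, len(a) - 1)]
--     while stack:
--         p, r = stack.pop()
--         comps += 1
--         if p < r:
--             x = a[r]
--             i = p - 1
--             j = p
--             while j < r:
--                 comps += 1
--                 if a[j] <= x:
--                     i += 1
--                     a[i], a[j] = a[j], a[i]
--                     swaps += 1
--                 j += 1
--             a[i + 1], a[r] = a[r], a[i + 1]
--             swaps += 1
--             q = i + 1
--             stack.append((q + 1, r))
--             stack.append((p, q - 1))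
--     return comps + swaps
-- ===== Notes on version B (the rewrite author's own statement) =====
-- stated objective: alternative
-- what changed: Replaces the recursive quick_sort and its StepCounter object by an iterative loop over an explicit LIFO stack of (p, r) ranges with two plain integer counters (the empty/singleton ranges are pushed and counted too, matching A's per-call comparison), keeping the Lomuto partition as an inline while-loop.
import Mathlib
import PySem

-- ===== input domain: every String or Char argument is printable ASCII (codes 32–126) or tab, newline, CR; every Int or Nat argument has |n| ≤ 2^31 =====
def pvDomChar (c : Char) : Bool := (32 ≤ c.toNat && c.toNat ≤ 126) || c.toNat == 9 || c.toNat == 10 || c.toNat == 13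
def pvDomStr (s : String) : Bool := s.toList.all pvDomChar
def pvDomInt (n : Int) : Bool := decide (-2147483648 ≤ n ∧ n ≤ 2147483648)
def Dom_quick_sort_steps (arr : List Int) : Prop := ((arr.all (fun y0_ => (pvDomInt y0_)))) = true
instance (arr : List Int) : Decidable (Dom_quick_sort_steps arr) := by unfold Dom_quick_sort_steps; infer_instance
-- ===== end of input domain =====

-- B replaces the recursive quick_sort (with its StepCounter object) by an iterative loop over an
-- explicit LIFO stack of (p, r) ranges and two plain integer counters; same Lomuto partition,
-- same exact count.  (objective: alternative decomposition; neither version mutates its argument —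
-- A sorts a copy.)  Recursions/loops below carry a Nat fuel that is always sufficient (a totality
-- guard only, no algorithm change).

-- ===== PORT A =====
-- A[i], A[j] = A[j], A[i]: indices produced by the algorithm are always in range and
-- nonnegative (p-1 < i+1 ≤ j < r ≤ len-1 on every call), so getD 0 / toNat never fire.
def pvSwap (A : List Int) (i j : Int) : List Int :=
  let ai := (PySem.List.pyGet? A i).getD 0
  let aj := (PySem.List.pyGet? A j).getD 0
  (A.set j.toNat ai).set i.toNat aj

-- partition(A, p, r): returns (A', i+1, comparisons, swaps) added by this call
def pvPartitionA (A : List Int) (p r : Int) : List Int × Int × Int × Int :=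
  let x := (PySem.List.pyGet? A r).getD 0
  let st := (PySem.List.pyRange p r 1).foldl
    (fun (st : List Int × Int × Int × Int) j =>
      let c := st.2.2.1 + 1
      if (PySem.List.pyGet? st.1 j).getD 0 ≤ x then
        (pvSwap st.1 (st.2.1 + 1) j, st.2.1 + 1, c, st.2.2.2 + 1)
      else (st.1, st.2.1, c, st.2.2.2))
    (A, p - 1, 0, 0)
  (pvSwap st.1 (st.2.1 + 1) r, st.2.1 + 1, st.2.2.1, st.2.2.2 + 1)

-- quick_sort(A, p, r): (A', comparisons, swaps) of this call and its recursive calls.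
-- The recursion depth never exceeds the range size + 1, so the fuel passed below never runs out.
def pvQuickA : Nat → List Int → Int → Int → List Int × Int × Int
  | 0, A, _, _ => (A, 1, 0)
  | fuel + 1, A, p, r =>
    if p < r then
      let P := pvPartitionA A p r
      let L := pvQuickA fuel P.1 p (P.2.1 - 1)
      let R := pvQuickA fuel L.1 (P.2.1 + 1) r
      (R.1, 1 + P.2.2.1 + L.2.1 + R.2.1, P.2.2.2 + L.2.2 + R.2.2)
    else (A, 1, 0)

def quick_sort_steps (arr : List Int) : Int :=
  let R := pvQuickA (arr.length + 1) arr 0 ((arr.length : Int) - 1)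
  R.2.1 + R.2.2

-- ===== PORT B =====
-- the inner 'while j < r' loop of Source B, threading (a, i, comps, swaps);
-- fuel (r - j).toNat counts the remaining iterations exactly
def pvPartLoopB (x r : Int) : Nat → List Int → Int → Int → Int → Int → List Int × Int × Int × Int
  | 0, A, i, _, c, s => (A, i, c, s)
  | fuel + 1, A, i, j, c, s =>
    if j < r then
      if (PySem.List.pyGet? A j).getD 0 ≤ x then
        pvPartLoopB x r fuel (pvSwap A (i + 1) j) (i + 1) (j + 1) (c + 1) (s + 1)
      else
        pvPartLoopB x r fuel A i (j + 1) (c + 1) s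
    else (A, i, c, s)

-- one pop of the stack when p < r: inline Lomuto partition, returning (a, q, comps, swaps)
def pvPartitionB (A : List Int) (p r : Int) : List Int × Int × Int × Int :=
  let x := (PySem.List.pyGet? A r).getD 0
  let st := pvPartLoopB x r (r - p).toNat A (p - 1) p 0 0
  (pvSwap st.1 (st.2.1 + 1) r, st.2.1 + 1, st.2.2.1, st.2.2.2 + 1)

-- the 'while stack' loop of Source B, threading (a, comps, swaps); one fuel unit per pop,
-- and the stack loop pops at most 2*len+1 ranges in total
def pvLoopB : Nat → List (Int × Int) → List Int → Int → Int → List Int × Int × Int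
  | 0, _, A, c, s => (A, c, s)
  | fuel + 1, stack, A, c, s =>
    match stack with
    | [] => (A, c, s)
    | (p, r) :: rest =>
      if p < r then
        let P := pvPartitionB A p r
        pvLoopB fuel ((p, P.2.1 - 1) :: (P.2.1 + 1, r) :: rest) P.1 (c + 1 + P.2.2.1) (s + P.2.2.2)
      else
        pvLoopB fuel rest A (c + 1) s

def quick_sort_steps_alt (arr : List Int) : Int :=
  let R := pvLoopB (2 * arr.length + 1) [(0, (arr.length : Int) - 1)] arr 0 0
  R.2.1 + R.2.2

-- ===== PRECONDITION & SPEC =====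
def Spec_quick_sort_steps (arr : List Int) (out : Int) : Prop := out = quick_sort_steps_alt arr
instance (arr : List Int) (out : Int) : Decidable (Spec_quick_sort_steps arr out) := by unfold Spec_quick_sort_steps; infer_instance

-- ===== CLAIM (what is proved, stated in full; the proofs are below) =====
def Claim_equal_quick_sort_steps : Prop := ∀ (arr : List Int), Dom_quick_sort_steps arr → Spec_quick_sort_steps arr (quick_sort_steps arr)

-- ===== LEMMAS AND PROOFS =====

-- i starts at p-1 and grows by at most 1 per loop step
theorem pvFoldA_i_bounds (x : Int) (l : List Int) :
    ∀ (st : List Int × Int × Int × Int),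
    st.2.1 ≤ (l.foldl
      (fun (st : List Int × Int × Int × Int) j =>
        let c := st.2.2.1 + 1
        if (PySem.List.pyGet? st.1 j).getD 0 ≤ x then
          (pvSwap st.1 (st.2.1 + 1) j, st.2.1 + 1, c, st.2.2.2 + 1)
        else (st.1, st.2.1, c, st.2.2.2)) st).2.1 ∧
    (l.foldl
      (fun (st : List Int × Int × Int × Int) j =>
        let c := st.2.2.1 + 1
        if (PySem.List.pyGet? st.1 j).getD 0 ≤ x then
          (pvSwap st.1 (st.2.1 + 1) j, st.2.1 + 1, c, st.2.2.2 + 1)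
        else (st.1, st.2.1, c, st.2.2.2)) st).2.1 ≤ st.2.1 + l.length := by
  induction l with
  | nil => intro st; simp
  | cons a t ih =>
    intro st
    simp only [List.foldl_cons, List.length_cons]
    by_cases h : (PySem.List.pyGet? st.1 a).getD 0 ≤ x
    · have := ih (pvSwap st.1 (st.2.1 + 1) a, st.2.1 + 1, st.2.2.1 + 1, st.2.2.2 + 1)
      simp only [h, if_pos] at *
      omega
    · have := ih (st.1, st.2.1, st.2.2.1 + 1, st.2.2.2)
      simp only [h, if_neg, not_false_iff] at *
      omega

theorem pvPartitionA_q_bounds (A : List Int) (p r : Int) (h : p < r) :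
    p ≤ (pvPartitionA A p r).2.1 ∧ (pvPartitionA A p r).2.1 ≤ r := by
  unfold pvPartitionA
  have hb := pvFoldA_i_bounds ((PySem.List.pyGet? A r).getD 0) (PySem.List.pyRange p r 1)
      (A, p - 1, 0, 0)
  rw [PySem.List.length_pyRange_one] at hb
  dsimp only at hb ⊢
  omega

-- B's while-loop (with sufficient fuel) computes A's fold over range(j, r)
theorem pvPartLoopB_eq_fold (x r : Int) :
    ∀ (f : Nat) (A : List Int) (i j c s : Int), (r - j).toNat ≤ f →
    pvPartLoopB x r f A i j c s =
      (PySem.List.pyRange j r 1).foldl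
        (fun (st : List Int × Int × Int × Int) k =>
          let cc := st.2.2.1 + 1
          if (PySem.List.pyGet? st.1 k).getD 0 ≤ x then
            (pvSwap st.1 (st.2.1 + 1) k, st.2.1 + 1, cc, st.2.2.2 + 1)
          else (st.1, st.2.1, cc, st.2.2.2)) (A, i, c, s) := by
  intro f
  induction f with
  | zero =>
    intro A i j c s hf
    have : PySem.List.pyRange j r 1 = [] := by
      rw [PySem.List.pyRange_one]
      have : (r - j).toNat = 0 := by omega
      simp [this]
    rw [this, pvPartLoopB]
    rfl
  | succ m ih =>
    intro A i j c s hf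
    by_cases h : j < r
    · rw [PySem.List.pyRange_one_cons h, List.foldl_cons, pvPartLoopB]
      simp only [h, if_pos]
      by_cases hle : (PySem.List.pyGet? A j).getD 0 ≤ x
      · simp only [hle, if_pos]
        exact ih _ _ _ _ _ (by omega)
      · simp only [hle, if_neg, not_false_iff]
        exact ih _ _ _ _ _ (by omega)
    · have he : PySem.List.pyRange j r 1 = [] := by
        rw [PySem.List.pyRange_one]
        have : (r - j).toNat = 0 := by omega
        simp [this]
      rw [he, pvPartLoopB]
      simp only [h, if_neg, not_false_iff]
      rfl

-- A's partition helper and B's inline partition compute the same quadruple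
theorem pvPartition_eq (A : List Int) (p r : Int) :
    pvPartitionA A p r = pvPartitionB A p r := by
  unfold pvPartitionA pvPartitionB
  dsimp only
  rw [pvPartLoopB_eq_fold _ _ _ _ _ _ _ _ (le_refl (r - p).toNat)]

theorem pvLoopB_nil (f : Nat) (A : List Int) (c s : Int) :
    pvLoopB f [] A c s = (A, c, s) := by
  cases f <;> rfl

-- processing a pushed range with the stack equals running A's recursion on it first;
-- k is the number of pops it takes, at most 2*size+1
theorem pvLoopB_split (n : Nat) :
    ∀ (p r : Int), (r - p + 1).toNat ≤ n →
    ∀ (fq : Nat), (r - p + 1).toNat < fq →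
    ∀ (A : List Int) (stack : List (Int × Int)) (c s : Int),
    ∃ k : Nat, k ≤ 2 * (r - p + 1).toNat + 1 ∧
      ∀ fl : Nat, pvLoopB (k + fl) ((p, r) :: stack) A c s =
        pvLoopB fl stack (pvQuickA fq A p r).1
          (c + (pvQuickA fq A p r).2.1) (s + (pvQuickA fq A p r).2.2) := by
  induction n with
  | zero =>
    intro p r hn fq hfq A stack c s
    have hpr : ¬ p < r := by omega
    obtain ⟨m, rfl⟩ : ∃ m, fq = m + 1 := ⟨fq - 1, by omega⟩
    refine ⟨1, by omega, fun fl => ?_⟩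
    rw [Nat.add_comm 1 fl, pvLoopB, pvQuickA]
    simp [hpr]
  | succ n ih =>
    intro p r hn fq hfq A stack c s
    obtain ⟨m, rfl⟩ : ∃ m, fq = m + 1 := ⟨fq - 1, by omega⟩
    by_cases h : p < r
    · have hq := pvPartitionA_q_bounds A p r h
      set P := pvPartitionA A p r with hP
      set L := pvQuickA m P.1 p (P.2.1 - 1) with hL
      set R := pvQuickA m L.1 (P.2.1 + 1) r with hR
      obtain ⟨kL, hkL, HL⟩ := ih p (P.2.1 - 1) (by omega) m (by omega)
        P.1 ((P.2.1 + 1, r) :: stack) (c + 1 + P.2.2.1) (s + P.2.2.2)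
      obtain ⟨kR, hkR, HR⟩ := ih (P.2.1 + 1) r (by omega) m (by omega)
        L.1 stack (c + 1 + P.2.2.1 + L.2.1) (s + P.2.2.2 + L.2.2)
      refine ⟨1 + kL + kR, by omega, fun fl => ?_⟩
      have hstep : (1 : Nat) + kL + kR + fl = (kL + (kR + fl)) + 1 := by omega
      rw [hstep, pvLoopB]
      simp only [← pvPartition_eq, ← hP, h, if_pos]
      rw [HL (kR + fl), HR fl, pvQuickA]
      simp only [h, if_pos, ← hP]
      rw [← hL, ← hR]
      have hc : c + 1 + P.2.2.1 + L.2.1 + R.2.1 = c + (1 + P.2.2.1 + L.2.1 + R.2.1) := by ring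
      have hs : s + P.2.2.2 + L.2.2 + R.2.2 = s + (P.2.2.2 + L.2.2 + R.2.2) := by ring
      rw [hc, hs]
    · refine ⟨1, by omega, fun fl => ?_⟩
      rw [Nat.add_comm 1 fl, pvLoopB, pvQuickA]
      simp [h]

-- ===== VERDICT (by name: the statement is the Claim_ definition above) =====
theorem quick_sort_steps_spec : Claim_equal_quick_sort_steps := by
  intro arr _
  unfold Spec_quick_sort_steps quick_sort_steps quick_sort_steps_alt
  obtain ⟨k, hk, H⟩ := pvLoopB_split (((arr.length : Int) - 1 - 0 + 1).toNat)
    0 ((arr.length : Int) - 1) le_rfl (arr.length + 1) (by omega) arr [] 0 0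
  have hfuel : 2 * arr.length + 1 = k + (2 * arr.length + 1 - k) := by omega
  rw [hfuel, H, pvLoopB_nil]
  dsimp only
  ring
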